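-- pv_equiv track=rewrite | github.com/virtdev/virtdev | lib/dhcp.py | _check_addr
-- ===== SOURCE A (Python) =====
-- def _check_addr(addr, networks):
--     field = addr.split('.')
--     net = '%s.%s.%s.' % (field[0], field[1], field[2])
--     len_net = len(net)
--     for n in networks:
--         length = len(n)
--         if len_net >= length and net[0:length] == n:
--             return False
--     return True
-- ===== SOURCE B (Python) =====
-- def _check_addr(addr, networks):
--     field = addr.split('.')
--     net = '%s.%s.%s.' % (field[0], field[1], field[2])
--     prefixes = {net[:i] for i in range(len(net) + 1)}
--     return set(networks).isdisjoint(prefixes)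
-- ===== Notes on version B (the rewrite author's own statement) =====
-- stated objective: alternative
-- what changed: Instead of linearly comparing each network string against the subnet via a length check and an explicit slice comparison, B builds the finite set of all prefixes of the subnet string once and asks whether the networks (as a set) are disjoint from it.
import Mathlib
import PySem

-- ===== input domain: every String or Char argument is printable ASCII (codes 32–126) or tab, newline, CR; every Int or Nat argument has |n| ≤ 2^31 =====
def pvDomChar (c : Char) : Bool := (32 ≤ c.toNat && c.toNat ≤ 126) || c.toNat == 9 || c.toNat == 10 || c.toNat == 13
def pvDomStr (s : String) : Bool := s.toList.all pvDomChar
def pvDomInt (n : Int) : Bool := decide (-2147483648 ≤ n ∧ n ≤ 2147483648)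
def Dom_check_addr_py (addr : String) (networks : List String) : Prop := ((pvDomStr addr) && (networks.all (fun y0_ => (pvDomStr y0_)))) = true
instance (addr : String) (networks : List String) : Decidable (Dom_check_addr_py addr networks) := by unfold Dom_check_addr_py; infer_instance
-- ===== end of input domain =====

-- B replaces A's linear scan with slice comparisons by a set of all prefixes of the
-- subnet string and a set-disjointness test (alternative decomposition, no speed claim).

-- ===== PORT A =====
-- the for-loop over networks with its early 'return False'
def checkAddrLoopA (net : List Char) (len_net : Int) : List (List Char) → Bool
  | [] => true
  | n :: rest =>
    let length : Int := PySem.Chars.len n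
    if len_net ≥ length ∧ PySem.Chars.slice net (some 0) (some length) = n then false
    else checkAddrLoopA net len_net rest

def check_addr_py (addr : String) (networks : List String) : Bool :=
  let field := PySem.Chars.splitOn addr.toList ['.']
  match PySem.List.pyGet? field 0, PySem.List.pyGet? field 1, PySem.List.pyGet? field 2 with
  | some f0, some f1, some f2 =>
    let net : List Char := f0 ++ '.' :: f1 ++ '.' :: f2 ++ ['.']
    let len_net : Int := PySem.Chars.len net
    checkAddrLoopA net len_net (networks.map String.toList)
  | _, _, _ => false  -- IndexError in Python; excluded by Pre_

-- ===== PORT B =====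
def check_addr_py_alt (addr : String) (networks : List String) : Bool :=
  let field := PySem.Chars.splitOn addr.toList ['.']
  match PySem.List.pyGet? field 0 with
  | none => false  -- IndexError in Python; excluded by Pre_
  | some f0 =>
    match PySem.List.pyGet? field 1 with
    | none => false
    | some f1 =>
      match PySem.List.pyGet? field 2 with
      | none => false
      | some f2 =>
        let net : List Char := f0 ++ '.' :: f1 ++ '.' :: f2 ++ ['.']
        let prefixes : PySem.Set (List Char) :=
          PySem.Set.ofList ((PySem.List.pyRange 0 (PySem.Chars.len net + 1) 1).map
            (fun i => PySem.Chars.slice net none (some i)))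
        PySem.Set.isdisjoint (PySem.Set.ofList (networks.map String.toList)) prefixes

-- ===== PRECONDITION & SPEC =====
-- Pre_ excludes exactly the inputs where Python raises IndexError: addr.split('.')
-- must have at least three fields (both A and B raise there alike).
def Pre_check_addr_py (addr : String) (networks : List String) : Prop :=
  3 ≤ (PySem.Chars.splitOn addr.toList ['.']).length
instance (addr : String) (networks : List String) : Decidable (Pre_check_addr_py addr networks) := by unfold Pre_check_addr_py; infer_instance
def pvWitness_check_addr_py : String × List String := ("10.1.2.3", ["10.1.", "9."])

def Spec_check_addr_py (addr : String) (networks : List String) (out : Bool) : Prop := out = check_addr_py_alt addr networks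
instance (addr : String) (networks : List String) (out : Bool) : Decidable (Spec_check_addr_py addr networks out) := by unfold Spec_check_addr_py; infer_instance

-- ===== CLAIM (what is proved, stated in full; the proofs are below) =====
def Claim_equal_check_addr_py : Prop := ∀ (addr : String) (networks : List String), Dom_check_addr_py addr networks → Pre_check_addr_py addr networks → Spec_check_addr_py addr networks (check_addr_py addr networks)

-- ===== LEMMAS AND PROOFS =====

-- A's loop condition holds exactly when n is a prefix of net
theorem condA_iff_prefix (net n : List Char) :
    ((PySem.Chars.len net ≥ PySem.Chars.len n ∧
      PySem.Chars.slice net (some 0) (some (PySem.Chars.len n)) = n) ↔ n <+: net) := by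
  simp only [PySem.Chars.len_eq, PySem.Chars.slice_eq_listSlice, ge_iff_le,
    PySem.List.slice_zero_start, PySem.List.slice_to_natCast]
  constructor
  · rintro ⟨_, h⟩; exact h ▸ List.take_prefix _ _
  · intro h
    refine ⟨by exact_mod_cast h.length_le, ?_⟩
    exact (List.prefix_iff_eq_take.mp h).symm

-- membership in B's prefix list is exactly being a prefix of net
theorem mem_prefixList_iff (net n : List Char) :
    (n ∈ (PySem.List.pyRange 0 (PySem.Chars.len net + 1) 1).map
      (fun i => PySem.Chars.slice net none (some i)) ↔ n <+: net) := by
  simp only [List.mem_map, PySem.List.mem_pyRange_one, PySem.Chars.slice_eq_listSlice]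
  constructor
  · rintro ⟨i, ⟨hi0, _⟩, rfl⟩
    rw [PySem.List.slice_to]
    · exact List.take_prefix _ _
    · exact hi0
  · intro h
    refine ⟨(n.length : Int), ⟨by positivity, ?_⟩, ?_⟩
    · have := h.length_le
      simp only [PySem.Chars.len_eq]; omega
    · rw [show ((n.length : Int)) = ((n.length : Nat) : Int) from rfl,
        PySem.List.slice_to_natCast]
      exact (List.prefix_iff_eq_take.mp h).symm

theorem loopA_eq_disjoint (net : List Char) (L : List (List Char)) :
    checkAddrLoopA net (PySem.Chars.len net) L =
      PySem.Set.isdisjoint (PySem.Set.ofList L)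
        (PySem.Set.ofList ((PySem.List.pyRange 0 (PySem.Chars.len net + 1) 1).map
          (fun i => PySem.Chars.slice net none (some i)))) := by
  by_cases h : ∃ n ∈ L, n <+: net
  · obtain ⟨n, hn, hpre⟩ := h
    have hA : checkAddrLoopA net (PySem.Chars.len net) L = false := by
      induction L with
      | nil => simp at hn
      | cons m rest ih =>
        rw [checkAddrLoopA]
        rcases List.mem_cons.mp hn with rfl | hm
        · split_ifs with hc
          · rfl
          · exact absurd ((condA_iff_prefix net n).mpr hpre) hc
        · split_ifs with hc
          · rfl
          · exact ih hm
    have hB : PySem.Set.isdisjoint (PySem.Set.ofList L)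
        (PySem.Set.ofList ((PySem.List.pyRange 0 (PySem.Chars.len net + 1) 1).map
          (fun i => PySem.Chars.slice net none (some i)))) = false := by
      apply Bool.not_eq_true _ |>.mp
      intro hd
      have := (PySem.Set.isdisjoint_iff _ _).mp hd n ((PySem.Set.mem_ofList _ _).mpr hn)
      exact this ((PySem.Set.mem_ofList _ _).mpr ((mem_prefixList_iff net n).mpr hpre))
    rw [hA, hB]
  · rw [not_exists] at h
    simp only [not_and] at h
    have hA : checkAddrLoopA net (PySem.Chars.len net) L = true := by
      induction L with
      | nil => rfl
      | cons m rest ih =>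
        rw [checkAddrLoopA]
        have : ¬ (PySem.Chars.len net ≥ PySem.Chars.len m ∧
            PySem.Chars.slice net (some 0) (some (PySem.Chars.len m)) = m) := by
          rw [condA_iff_prefix]; exact h m (List.mem_cons_self ..)
        simp only [this, if_false]
        exact ih (fun n hn => h n (List.mem_cons_of_mem _ hn))
    have hB : PySem.Set.isdisjoint (PySem.Set.ofList L)
        (PySem.Set.ofList ((PySem.List.pyRange 0 (PySem.Chars.len net + 1) 1).map
          (fun i => PySem.Chars.slice net none (some i)))) = true := by
      rw [PySem.Set.isdisjoint_iff]
      intro x hx hmem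
      exact h x ((PySem.Set.mem_ofList _ _).mp hx)
        ((mem_prefixList_iff net x).mp ((PySem.Set.mem_ofList _ _).mp hmem))
    rw [hA, hB]

-- ===== VERDICT (by name: the statement is the Claim_ definition above) =====
theorem check_addr_py_spec : Claim_equal_check_addr_py := by
  intro addr _networks _ hpre
  unfold Spec_check_addr_py check_addr_py check_addr_py_alt
  unfold Pre_check_addr_py at hpre
  rcases hL : PySem.Chars.splitOn addr.toList ['.'] with _ | ⟨f0, _ | ⟨f1, _ | ⟨f2, rest⟩⟩⟩ <;>
    rw [hL] at hpre <;> simp only [List.length_nil, List.length_cons] at hpre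
  · omega
  · omega
  · omega
  simp only [PySem.List.pyGet?_zero, List.getElem?_cons_zero,
    show (1 : Int) = ((1 : Nat) : Int) from rfl, show (2 : Int) = ((2 : Nat) : Int) from rfl,
    PySem.List.pyGet?_natCast, List.getElem?_cons_succ]
  exact loopA_eq_disjoint _ _
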